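-- pv_equiv track=rewrite | github.com/belenes/parser | avigliano_lexer_v3.py | a_Distinto
-- ===== SOURCE A (Python) =====
-- def a_Distinto(src):
--     s = 1
--     for c in src:
--         if s == 1 and c == '!':
--             s = 2
--         elif s == 2 and c == '=':
--             s = 3
--         else:
--             s = -1
--             break
--     return s == 3
-- ===== SOURCE B (Python) =====
-- def a_Distinto(src):
--     return list(src) == ['!', '=']
-- ===== Notes on version B (the rewrite author's own statement) =====
-- stated objective: simpler
-- what changed: Replaces the hand-rolled state machine (state variable, per-character branches, early break) with a single structural comparison of the materialized character sequence against the fixed two-element pattern ['!','='].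
import Mathlib
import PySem

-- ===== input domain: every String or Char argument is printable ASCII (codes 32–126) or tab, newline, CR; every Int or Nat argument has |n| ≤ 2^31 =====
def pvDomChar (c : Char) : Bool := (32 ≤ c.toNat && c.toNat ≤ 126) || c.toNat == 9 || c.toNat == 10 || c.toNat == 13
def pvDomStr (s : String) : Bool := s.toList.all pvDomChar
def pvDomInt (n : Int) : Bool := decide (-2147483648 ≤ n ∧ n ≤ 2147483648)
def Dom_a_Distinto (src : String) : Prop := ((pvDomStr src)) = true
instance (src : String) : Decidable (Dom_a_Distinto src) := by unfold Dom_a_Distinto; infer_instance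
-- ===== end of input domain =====

-- B replaces A's per-character state machine by one comparison of the char list with ['!','='] (simpler).
-- ===== PORT A =====
-- A's loop with early break: recurse over the chars threading the state s; break returns -1.
def aDistLoop (s : Int) : List Char → Int
  | [] => s
  | c :: rest =>
    if s == 1 && c == '!' then aDistLoop 2 rest
    else if s == 2 && c == '=' then aDistLoop 3 rest
    else -1

def a_Distinto (src : String) : Bool := aDistLoop 1 src.toList == 3

-- ===== PORT B =====
def a_Distinto_alt (src : String) : Bool := src.toList == ['!', '=']

-- ===== PRECONDITION & SPEC =====
def Spec_a_Distinto (src : String) (out : Bool) : Prop := out = a_Distinto_alt src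
instance (src : String) (out : Bool) : Decidable (Spec_a_Distinto src out) := by unfold Spec_a_Distinto; infer_instance

-- ===== CLAIM (what is proved, stated in full; the proofs are below) =====
def Claim_equal_a_Distinto : Prop := ∀ (src : String), Dom_a_Distinto src → Spec_a_Distinto src (a_Distinto src)

-- ===== LEMMAS AND PROOFS =====
theorem aDistLoop_char : ∀ (l : List Char), (aDistLoop 1 l == 3) = (l == ['!', '=']) := by
  intro l
  match l with
  | [] => decide
  | [c] =>
      simp only [aDistLoop]
      by_cases h : c = '!' <;> simp [h, aDistLoop]
  | [c, d] =>
      simp only [aDistLoop]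
      by_cases h : c = '!' <;> by_cases h2 : d = '=' <;> simp [h, h2, aDistLoop]
  | c :: d :: e :: rest =>
      simp only [aDistLoop]
      by_cases h : c = '!' <;> by_cases h2 : d = '=' <;> simp [h, h2, aDistLoop]

-- ===== VERDICT (by name: the statement is the Claim_ definition above) =====
theorem a_Distinto_spec : Claim_equal_a_Distinto := by
  intro src _
  unfold Spec_a_Distinto a_Distinto a_Distinto_alt
  exact aDistLoop_char src.toList
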